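-- pv_equiv track=rewrite | github.com/linkeLi0421/auto-bug-migration | script/react_agent/tools/extra_patch_tools.py | _brace_delta_ignoring_comments
-- ===== SOURCE A (Python) =====
-- from typing import Any, Dict, Iterable, List, Optional, Tuple
--
-- def _brace_delta_ignoring_comments(code: str, in_block_comment: bool) -> Tuple[int, bool]:
--     """Return (brace_delta, in_block_comment_after) for a single C code line."""
--     delta = 0
--     i = 0
--     n = len(code)
--     while i < n:
--         if in_block_comment:
--             end = code.find("*/", i)
--             if end < 0:
--                 return delta, True
--             i = end + 2
--             in_block_comment = False
--             continue
--
--         if code.startswith("//", i):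
--             break
--         if code.startswith("/*", i):
--             in_block_comment = True
--             i += 2
--             continue
--
--         ch = code[i]
--         if ch == "{":
--             delta += 1
--         elif ch == "}":
--             delta -= 1
--         i += 1
--
--     return delta, in_block_comment
-- ===== SOURCE B (Python) =====
-- def _brace_delta_ignoring_comments(code, in_block_comment):
--     """Return (brace_delta, in_block_comment_after) for a single C code line.
--
--     Char-by-char DFA (CODE / SLASH / BLOCK / STAR): strips comment content into
--     nothing, collects code characters into buf, then counts braces at the end.
--     """
--     CODE, SLASH, BLOCK, STAR = 0, 1, 2, 3
--     state = BLOCK if in_block_comment else CODE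
--     buf = []
--     for ch in code:
--         if state == CODE:
--             if ch == '/':
--                 state = SLASH
--             else:
--                 buf.append(ch)
--         elif state == SLASH:
--             if ch == '/':
--                 break  # line comment: rest of line ignored
--             elif ch == '*':
--                 state = BLOCK
--             else:
--                 buf.append('/')
--                 buf.append(ch)
--                 state = CODE
--         elif state == BLOCK:
--             if ch == '*':
--                 state = STAR
--         else:  # STAR: inside block comment, just saw '*'
--             if ch == '/':
--                 state = CODE
--             elif ch != '*':
--                 state = BLOCK
--     delta = buf.count('{') - buf.count('}')
--     return delta, state in (BLOCK, STAR)
-- ===== Notes on version B (the rewrite author's own statement) =====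
-- stated objective: alternative
-- what changed: Replaces A's index-jumping loop (str.find for '*/', startswith probes for '//' and '/*', inline brace counting) with a char-by-char 4-state DFA that strips comment content into a buffer and counts both braces in separate passes at the end.
import Mathlib
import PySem

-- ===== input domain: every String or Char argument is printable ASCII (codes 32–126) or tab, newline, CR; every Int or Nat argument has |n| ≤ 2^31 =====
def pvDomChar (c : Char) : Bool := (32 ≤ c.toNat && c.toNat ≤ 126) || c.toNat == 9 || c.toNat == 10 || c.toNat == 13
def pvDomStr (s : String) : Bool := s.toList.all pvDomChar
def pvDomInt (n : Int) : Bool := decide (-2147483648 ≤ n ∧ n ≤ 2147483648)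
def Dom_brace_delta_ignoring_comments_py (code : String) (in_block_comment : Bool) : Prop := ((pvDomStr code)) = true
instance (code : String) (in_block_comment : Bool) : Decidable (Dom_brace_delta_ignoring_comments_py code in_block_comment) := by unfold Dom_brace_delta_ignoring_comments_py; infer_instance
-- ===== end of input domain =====

-- B replaces A's index jumps (str.find("*/"), startswith probes, inline brace counting) by a
-- char-by-char 4-state DFA that buffers non-comment characters and counts braces afterwards.
-- ===== PORT A =====
-- port of `code.find("*/", i)` followed by `i = end + 2`: returns the suffix after the
-- first "*/", or none if absent (exact: str.find scans left to right).
def pvSkipStarSlash : List Char → Option (List Char)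
  | [] => none
  | c :: rest =>
    if c = '*' ∧ rest.head? = some '/' then some rest.tail
    else pvSkipStarSlash rest

theorem pvSkipStarSlash_length_lt : ∀ (cs r : List Char), pvSkipStarSlash cs = some r → r.length < cs.length := by
  intro cs
  induction cs with
  | nil => intro r h; simp [pvSkipStarSlash] at h
  | cons c rest ih =>
    intro r h
    simp only [pvSkipStarSlash] at h
    split_ifs at h with hc
    · cases h; cases rest <;> simp_all
    · have := ih r h; simp; omega

-- A's while loop as structural recursion over the remaining characters
def pvBraceA : List Char → Bool → Int → Int × Bool
  | [], inb, d => (d, inb)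
  | c :: rest, inb, d =>
    if inb then
      match h : pvSkipStarSlash (c :: rest) with
      | none => (d, true)
      | some r => pvBraceA r false d
    else if c = '/' ∧ rest.head? = some '/' then (d, false)   -- startswith("//", i): break
    else if c = '/' ∧ rest.head? = some '*' then pvBraceA rest.tail true d  -- startswith("/*", i)
    else if c = '{' then pvBraceA rest false (d + 1)
    else if c = '}' then pvBraceA rest false (d - 1)
    else pvBraceA rest false d
termination_by cs _ _ => cs.length
decreasing_by
  · exact pvSkipStarSlash_length_lt _ _ h
  all_goals cases rest <;> simp_all <;> omega

def brace_delta_ignoring_comments_py (code : String) (in_block_comment : Bool) : Int × Bool :=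
  pvBraceA code.toList in_block_comment 0

-- ===== PORT B =====
inductive PvSt where
  | code | slash | block | star
deriving DecidableEq, Repr

-- Source B's for-loop: DFA over the characters, appending non-comment chars to buf
def pvScanB : List Char → PvSt → List Char → List Char × PvSt
  | [], st, buf => (buf, st)
  | c :: rest, st, buf =>
    match st with
    | .code =>
      if c = '/' then pvScanB rest .slash buf
      else pvScanB rest .code (buf ++ [c])
    | .slash =>
      if c = '/' then (buf, .slash)                 -- break: line comment
      else if c = '*' then pvScanB rest .block buf
      else pvScanB rest .code (buf ++ ['/', c])
    | .block =>
      if c = '*' then pvScanB rest .star buf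
      else pvScanB rest .block buf
    | .star =>
      if c = '/' then pvScanB rest .code buf
      else if c = '*' then pvScanB rest .star buf
      else pvScanB rest .block buf

def brace_delta_ignoring_comments_py_alt (code : String) (in_block_comment : Bool) : Int × Bool :=
  let r := pvScanB code.toList (if in_block_comment then .block else .code) []
  ((PySem.List.count r.1 '{' : Int) - (PySem.List.count r.1 '}' : Int),
   r.2 = PvSt.block || r.2 = PvSt.star)

-- ===== PRECONDITION & SPEC =====
def Spec_brace_delta_ignoring_comments_py (code : String) (in_block_comment : Bool) (out : Int × Bool) : Prop := out = brace_delta_ignoring_comments_py_alt code in_block_comment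
instance (code : String) (in_block_comment : Bool) (out : Int × Bool) : Decidable (Spec_brace_delta_ignoring_comments_py code in_block_comment out) := by unfold Spec_brace_delta_ignoring_comments_py; infer_instance

-- ===== CLAIM (what is proved, stated in full; the proofs are below) =====
def Claim_equal_brace_delta_ignoring_comments_py : Prop := ∀ (code : String) (in_block_comment : Bool), Dom_brace_delta_ignoring_comments_py code in_block_comment → Spec_brace_delta_ignoring_comments_py code in_block_comment (brace_delta_ignoring_comments_py code in_block_comment)

-- ===== LEMMAS AND PROOFS =====
def pvCnt (buf : List Char) : Int :=
  (PySem.List.count buf '{' : Int) - (PySem.List.count buf '}' : Int)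

def pvOutPair (d : Int) (r : List Char × PvSt) : Int × Bool :=
  (d + pvCnt r.1, r.2 = PvSt.block || r.2 = PvSt.star)

theorem pvScanB_buf : ∀ (cs : List Char) (st : PvSt) (buf : List Char),
    pvScanB cs st buf = (buf ++ (pvScanB cs st []).1, (pvScanB cs st []).2)
  | [], st, buf => by simp [pvScanB]
  | c :: rest, st, buf => by
    cases st with
    | code =>
      by_cases h : c = '/'
      · simp only [pvScanB, if_pos h]
        exact pvScanB_buf rest .slash buf
      · simp only [pvScanB, if_neg h, List.nil_append]
        rw [pvScanB_buf rest .code (buf ++ [c]), pvScanB_buf rest .code [c], List.append_assoc]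
    | slash =>
      by_cases h : c = '/'
      · simp [pvScanB, if_pos h]
      · by_cases h2 : c = '*'
        · simp only [pvScanB, if_neg h, if_pos h2]
          exact pvScanB_buf rest .block buf
        · simp only [pvScanB, if_neg h, if_neg h2, List.nil_append]
          rw [pvScanB_buf rest .code (buf ++ ['/', c]), pvScanB_buf rest .code ['/', c],
            List.append_assoc]
    | block =>
      by_cases h : c = '*'
      · simp only [pvScanB, if_pos h]; exact pvScanB_buf rest .star buf
      · simp only [pvScanB, if_neg h]; exact pvScanB_buf rest .block buf
    | star =>
      by_cases h : c = '/'
      · simp only [pvScanB, if_pos h]; exact pvScanB_buf rest .code buf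
      · by_cases h2 : c = '*'
        · simp only [pvScanB, if_neg h, if_pos h2]; exact pvScanB_buf rest .star buf
        · simp only [pvScanB, if_neg h, if_neg h2]; exact pvScanB_buf rest .block buf

theorem pvCnt_cons (c : Char) (buf : List Char) :
    pvCnt (c :: buf) = (if c = '{' then (1:Int) else if c = '}' then -1 else 0) + pvCnt buf := by
  by_cases h1 : c = '{'
  · subst h1; simp [pvCnt, PySem.List.count_eq]; ring
  · by_cases h2 : c = '}'
    · subst h2; simp [pvCnt, PySem.List.count_eq]; ring
    · simp [pvCnt, PySem.List.count_eq, h1, h2]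

theorem pvBraceA_true (cs : List Char) (d : Int) :
    pvBraceA cs true d = (match pvSkipStarSlash cs with
      | none => (d, true)
      | some r => pvBraceA r false d) := by
  cases cs with
  | nil => simp [pvBraceA, pvSkipStarSlash]
  | cons c rest =>
    simp only [pvBraceA, if_pos]
    split <;> split <;> simp_all

theorem pvMain : ∀ (n : Nat),
    (∀ cs : List Char, cs.length + 1 ≤ n →
      ∀ d, pvBraceA ('*' :: cs) true d = pvOutPair d (pvScanB cs .star [])) ∧
    (∀ cs : List Char, cs.length ≤ n →
      (∀ d, pvBraceA cs true d = pvOutPair d (pvScanB cs .block [])) ∧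
      (∀ d, pvBraceA cs false d = pvOutPair d (pvScanB cs .code []))) := by
  intro n
  induction n with
  | zero =>
    refine ⟨fun cs h => by omega, fun cs h => ?_⟩
    have : cs = [] := by cases cs <;> simp_all
    subst this
    exact ⟨fun d => by simp [pvBraceA, pvScanB, pvOutPair, pvCnt, PySem.List.count_eq],
           fun d => by simp [pvBraceA, pvScanB, pvOutPair, pvCnt, PySem.List.count_eq]⟩
  | succ n ih =>
    have hstar : ∀ cs : List Char, cs.length + 1 ≤ n + 1 →
        ∀ d, pvBraceA ('*' :: cs) true d = pvOutPair d (pvScanB cs .star []) := by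
      intro cs hlen d
      rcases cs with _ | ⟨c, r⟩
      · simp [pvBraceA_true, pvSkipStarSlash, pvScanB, pvOutPair, pvCnt, PySem.List.count_eq]
      · by_cases hc : c = '/'
        · subst hc
          have hsk : pvSkipStarSlash ('*' :: '/' :: r) = some r := by simp [pvSkipStarSlash]
          rw [pvBraceA_true, hsk]
          have := (ih.2 r (by simp at hlen ⊢; omega)).2 d
          simpa [pvScanB] using this
        · by_cases hs : c = '*'
          · subst hs
            have hsk : pvSkipStarSlash ('*' :: '*' :: r) = pvSkipStarSlash ('*' :: r) := by
              simp [pvSkipStarSlash]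
            rw [pvBraceA_true, hsk, ← pvBraceA_true]
            have := ih.1 r (by simp at hlen ⊢; omega) d
            simpa [pvScanB] using this
          · have hsk : pvSkipStarSlash ('*' :: c :: r) = pvSkipStarSlash (c :: r) := by
              simp [pvSkipStarSlash, hc]
            rw [pvBraceA_true, hsk, ← pvBraceA_true]
            have := (ih.2 (c :: r) (by simp at hlen ⊢; omega)).1 d
            simpa [pvScanB, hc, hs] using this
    refine ⟨hstar, fun cs hlen => ⟨fun d => ?_, fun d => ?_⟩⟩
    · -- block state
      rcases cs with _ | ⟨c, r⟩
      · simp [pvBraceA, pvScanB, pvOutPair, pvCnt, PySem.List.count_eq]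
      · by_cases hs : c = '*'
        · subst hs
          have := hstar r (by simpa using hlen) d
          simpa [pvScanB] using this
        · have hsk : pvSkipStarSlash (c :: r) = pvSkipStarSlash r := by
            simp [pvSkipStarSlash, hs]
          rw [pvBraceA_true, hsk, ← pvBraceA_true]
          have := (ih.2 r (by simp at hlen ⊢; omega)).1 d
          simpa [pvScanB, hs] using this
    · -- code state
      rcases cs with _ | ⟨c, r⟩
      · simp [pvBraceA, pvScanB, pvOutPair, pvCnt, PySem.List.count_eq]
      · by_cases hc : c = '/'
        · subst hc
          rcases r with _ | ⟨c2, r2⟩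
          · simp [pvBraceA, pvScanB, pvOutPair, pvCnt, PySem.List.count_eq]
          · by_cases h2 : c2 = '/'
            · subst h2
              simp [pvBraceA, pvScanB, pvOutPair, pvCnt, PySem.List.count_eq]
            · by_cases h3 : c2 = '*'
              · subst h3
                have hA : pvBraceA ('/' :: '*' :: r2) false d = pvBraceA r2 true d := by
                  simp [pvBraceA]
                rw [hA]
                have := (ih.2 r2 (by simp at hlen ⊢; omega)).1 d
                simpa [pvScanB, h2] using this
              · have hA : pvBraceA ('/' :: c2 :: r2) false d = pvBraceA (c2 :: r2) false d := by
                  simp [pvBraceA, h2, h3]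
                rw [hA]
                have := (ih.2 (c2 :: r2) (by simp at hlen ⊢; omega)).2 d
                rw [this]
                simp [pvOutPair, pvCnt_cons, pvScanB, pvScanB_buf r2 .code [c2],
                  pvScanB_buf r2 .code ['/', c2], h2, h3]
        · have hA : pvBraceA (c :: r) false d
              = pvBraceA r false (d + (if c = '{' then 1 else if c = '}' then -1 else 0)) := by
            by_cases h4 : c = '{'
            · subst h4; simp [pvBraceA]
            · by_cases h5 : c = '}'
              · subst h5; simp [pvBraceA]; ring_nf
              · simp [pvBraceA, hc, h4, h5]
          rw [hA]
          have := (ih.2 r (by simp at hlen ⊢; omega)).2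
                    (d + (if c = '{' then 1 else if c = '}' then -1 else 0))
          rw [this]
          simp [pvOutPair, pvCnt_cons, pvScanB, pvScanB_buf r .code [c], hc]
          ring

-- ===== VERDICT (by name: the statement is the Claim_ definition above) =====
theorem brace_delta_ignoring_comments_py_spec : Claim_equal_brace_delta_ignoring_comments_py := by
  intro code inb _
  unfold Spec_brace_delta_ignoring_comments_py brace_delta_ignoring_comments_py brace_delta_ignoring_comments_py_alt
  have h := ((pvMain code.toList.length).2 code.toList le_rfl)
  cases inb with
  | false => have := h.2 0; rw [this]; simp [pvOutPair, pvCnt]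
  | true => have := h.1 0; rw [this]; simp [pvOutPair, pvCnt]
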